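-- pv_equiv track=rewrite | github.com/bharathkadur/CodeSignal | The Core/67. House Numbers Sum/HouseNumbersSum.py | solution
-- ===== SOURCE A (Python) =====
-- def solution(inputArray):
--     c = 0
--     for i in inputArray:
--         if i == 0:
--             break
--         else:
--             c += i
--     return c
-- ===== SOURCE B (Python) =====
-- def solution(inputArray):
--     if 0 in inputArray:
--         return sum(inputArray[:inputArray.index(0)])
--     return sum(inputArray)
-- ===== Notes on version B (the rewrite author's own statement) =====
-- stated objective: idiomatic
-- what changed: Replaces the single stop-at-zero accumulating loop by a locate pass (index of first zero / membership test) followed by summing the slice before it.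
import Mathlib
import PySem

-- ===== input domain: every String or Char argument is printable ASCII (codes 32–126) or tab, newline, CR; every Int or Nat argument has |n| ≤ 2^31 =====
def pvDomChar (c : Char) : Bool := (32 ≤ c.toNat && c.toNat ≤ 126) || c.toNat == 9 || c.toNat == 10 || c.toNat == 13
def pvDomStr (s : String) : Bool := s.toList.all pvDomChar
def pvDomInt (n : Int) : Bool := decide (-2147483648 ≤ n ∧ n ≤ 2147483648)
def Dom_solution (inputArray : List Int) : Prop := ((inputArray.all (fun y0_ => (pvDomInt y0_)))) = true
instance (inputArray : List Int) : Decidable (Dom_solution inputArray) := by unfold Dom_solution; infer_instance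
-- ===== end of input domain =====

-- B splits A's stop-at-zero accumulating loop into locate-first-zero then sum-the-prefix; same values, idiomatic two-pass form.

-- ===== PORT A =====
-- the for-loop with break: loop over the list carrying the accumulator c
def solutionLoop (c : Int) : List Int → Int
  | [] => c
  | i :: rest => if i = 0 then c else solutionLoop (c + i) rest

def solution (inputArray : List Int) : Int := solutionLoop 0 inputArray

-- ===== PORT B =====
def solution_alt (inputArray : List Int) : Int :=
  if inputArray.contains 0 then
    match PySem.List.index? inputArray 0 with
    | some k => (inputArray.take k).sum   -- inputArray[:k]
    | none => inputArray.sum              -- unreachable (0 ∈ inputArray)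
  else inputArray.sum

-- ===== PRECONDITION & SPEC =====
def Spec_solution (inputArray : List Int) (out : Int) : Prop := out = solution_alt inputArray
instance (inputArray : List Int) (out : Int) : Decidable (Spec_solution inputArray out) := by unfold Spec_solution; infer_instance

-- ===== CLAIM (what is proved, stated in full; the proofs are below) =====
def Claim_equal_solution : Prop := ∀ (inputArray : List Int), Dom_solution inputArray → Spec_solution inputArray (solution inputArray)

-- ===== LEMMAS AND PROOFS =====
theorem solutionLoop_acc (c : Int) (xs : List Int) :
    solutionLoop c xs = c + solutionLoop 0 xs := by
  induction xs generalizing c with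
  | nil => simp [solutionLoop]
  | cons i rest ih =>
    simp only [solutionLoop]
    split_ifs
    · simp
    · rw [ih (c + i), ih (0 + i)]; ring

theorem solution_eq_alt (xs : List Int) : solutionLoop 0 xs = solution_alt xs := by
  induction xs with
  | nil => simp [solutionLoop, solution_alt]
  | cons i rest ih =>
    by_cases hi : i = 0
    · subst hi
      rw [show solutionLoop 0 (0 :: rest) = 0 from by simp [solutionLoop]]
      simp only [solution_alt, List.contains_cons]
      rw [PySem.List.index?_cons_self]
      simp
    · rw [solutionLoop, if_neg hi, solutionLoop_acc, ih]
      simp only [solution_alt, List.contains_cons]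
      rw [PySem.List.index?_cons_of_ne rest hi]
      rcases h : PySem.List.index? rest 0 with _ | k
      · have hmem : (0:Int) ∉ rest := (PySem.List.index?_eq_none_iff rest 0).mp h
        have hc : rest.contains 0 = false := by simpa using hmem
        have h0i : ((0:Int) == i) = false := by simpa using (Ne.symm hi)
        simp [h0i]
      · have hs : (PySem.List.index? rest 0).isSome = true := by rw [h]; rfl
        have hmem : (0:Int) ∈ rest := (PySem.List.index?_isSome_iff rest 0).mp hs
        have hc : rest.contains 0 = true := by simpa using hmem
        simp only [h, Option.map_some, hc, Bool.or_true, if_pos rfl, List.take_succ_cons,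
          List.sum_cons]
        simp

-- ===== VERDICT (by name: the statement is the Claim_ definition above) =====
theorem solution_spec : Claim_equal_solution := by
  intro xs _
  unfold Spec_solution solution
  exact solution_eq_alt xs
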